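-- pv_equiv track=rewrite | github.com/khmariem/Exam-Calendar | Projet.py | construct_graph
-- ===== SOURCE A (Python) =====
-- def construct_graph(data):
--     '''
--     This method builds a graph in which the vertices are the different subjects and the edges exist between
--     two vertices if the same student chose those two subjects. For example, if Joe chose to study graph theory(1),
--     networks(2) and game theory(3), then an edge would exist between (1)&(2), (2)&(3) and (1)&(3).
--
--     @param data: the data issued from the read_data method previously developed.
--
--     @return g: a list of lists which is the graph built from our data. Each list is the list of neighbours of a vertice.
--
--     @return visited: the list of the vertices following the same order as in the graph g. So, the neighbours of visited[i] are
--     graph[i].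
--     '''
--     graph=[]
--     visited=[]
--     subject_index=0
--     for line in data:
--         for subject in line:
--             if (not subject in visited):
--                 visited.append(subject)
--                 graph.append([])
--                 subject_index=visited.index(subject)
--             else:
--                 subject_index=visited.index(subject)
--             for subject1 in line:
--                 if (subject1!=subject) and (subject1 not in graph[subject_index]):
--                     graph[subject_index].append(subject1)
--
--     return (graph,visited)
-- ===== SOURCE B (Python) =====
-- def construct_graph(data):
--     # Pass 1: collect the vertices in first-appearance order.
--     visited = []
--     for line in data:
--         for s in line:
--             if s not in visited:
--                 visited.append(s)
--
--     # Pass 2 (vertex-major): build each vertex's neighbour list independently by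
--     # scanning the data for the lines that contain it; no shared mutable graph,
--     # no index bookkeeping.
--     def neighbours(v):
--         out = []
--         for line in data:
--             if v in line:
--                 for t in line:
--                     if t != v and t not in out:
--                         out.append(t)
--         return out
--
--     return ([neighbours(v) for v in visited], visited)
-- ===== Notes on version B (the rewrite author's own statement) =====
-- stated objective: alternative
-- what changed: A builds the adjacency lists line-major in one interleaved scan, growing a shared mutable graph and re-locating the current subject with visited.index; B first lists the vertices, then builds each vertex's neighbour list independently, vertex-major, by scanning the data for the lines containing that vertex - no shared graph and no index lookups at all.
import Mathlib
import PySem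

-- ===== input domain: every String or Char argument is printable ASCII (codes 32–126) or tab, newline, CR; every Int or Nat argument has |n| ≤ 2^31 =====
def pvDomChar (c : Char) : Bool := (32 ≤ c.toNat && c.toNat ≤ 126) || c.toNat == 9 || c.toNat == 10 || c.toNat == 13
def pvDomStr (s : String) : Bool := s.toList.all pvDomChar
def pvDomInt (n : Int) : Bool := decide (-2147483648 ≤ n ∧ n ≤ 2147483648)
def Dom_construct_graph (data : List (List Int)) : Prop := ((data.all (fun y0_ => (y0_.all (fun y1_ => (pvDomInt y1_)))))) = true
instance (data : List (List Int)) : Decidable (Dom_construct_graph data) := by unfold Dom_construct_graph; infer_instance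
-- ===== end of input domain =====

-- B replaces A's line-major interleaved scan (shared mutable graph, visited.index
-- lookups) by a vertex-major construction: list the vertices first, then build each
-- vertex's neighbour list independently by scanning the lines that contain it
-- (objective: alternative decomposition; similar overall cost).

-- ===== PORT A =====
-- A's inner edge loop only reads/writes the single cell graph[subject_index],
-- so it is transliterated as a fold over that cell, written back once.
def aAddNbrs (s : Int) (line : List Int) (cell : List Int) : List Int :=
  line.foldl (fun acc t => if t ≠ s ∧ t ∉ acc then acc ++ [t] else acc) cell

def aStep (line : List Int) (st : List (List Int) × List Int) (s : Int) :
    List (List Int) × List Int :=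
  if s ∉ st.2 then
    -- visited.append(subject); graph.append([]); subject_index = visited.index(subject)
    let v := st.2 ++ [s]
    let g := st.1 ++ [[]]
    let i := (PySem.List.index? v s).getD 0
    (g.set i (aAddNbrs s line (g.getD i [])), v)
  else
    let i := (PySem.List.index? st.2 s).getD 0
    (st.1.set i (aAddNbrs s line (st.1.getD i [])), st.2)

def aLine (st : List (List Int) × List Int) (line : List Int) :
    List (List Int) × List Int :=
  line.foldl (aStep line) st

def construct_graph (data : List (List Int)) : List (List Int) × List Int :=
  data.foldl aLine ([], [])

-- ===== PORT B =====
-- pass 1 of Source B: visited in first-appearance order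
def bVisitLine (v : List Int) (line : List Int) : List Int :=
  line.foldl (fun v s => if s ∈ v then v else v ++ [s]) v

-- neighbours(v) of Source B: vertex-major scan over the data
def bNbrLine (v : Int) (out : List Int) (line : List Int) : List Int :=
  if v ∈ line then
    line.foldl (fun out t => if t ≠ v ∧ t ∉ out then out ++ [t] else out) out
  else out

def bNbrs (v : Int) (data : List (List Int)) : List Int :=
  data.foldl (bNbrLine v) []

def construct_graph_alt (data : List (List Int)) : List (List Int) × List Int :=
  let visited := data.foldl bVisitLine []
  (visited.map (fun v => bNbrs v data), visited)

-- ===== PRECONDITION & SPEC =====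
def Spec_construct_graph (data : List (List Int)) (out : List (List Int) × List Int) : Prop := out = construct_graph_alt data
instance (data : List (List Int)) (out : List (List Int) × List Int) : Decidable (Spec_construct_graph data out) := by unfold Spec_construct_graph; infer_instance

-- ===== CLAIM (what is proved, stated in full; the proofs are below) =====
def Claim_equal_construct_graph : Prop := ∀ (data : List (List Int)), Dom_construct_graph data → Spec_construct_graph data (construct_graph data)

-- ===== LEMMAS AND PROOFS =====

-- vertex discovery in isolation (the same fold B's pass 1 performs)
def discStep (v : List Int) (s : Int) : List Int := if s ∈ v then v else v ++ [s]
def discLine (v : List Int) (line : List Int) : List Int := line.foldl discStep v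
def disc (v : List Int) (data : List (List Int)) : List Int := data.foldl discLine v

theorem bVisitLine_eq : bVisitLine = discLine := by
  funext v line; rfl

-- edge pass against a fixed full vertex list V
def eStep (V : List Int) (line : List Int) (g : List (List Int)) (s : Int) :
    List (List Int) :=
  let i := (PySem.List.index? V s).getD 0
  g.set i (aAddNbrs s line (g.getD i []))

def eLine (V : List Int) (g : List (List Int)) (line : List Int) : List (List Int) :=
  line.foldl (eStep V line) g

theorem discStep_prefix (v : List Int) (s : Int) : v <+: discStep v s := by
  unfold discStep; split
  · exact List.prefix_refl _
  · exact ⟨[s], rfl⟩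

theorem foldl_discStep_prefix (subs : List Int) (v : List Int) :
    v <+: subs.foldl discStep v := by
  induction subs generalizing v with
  | nil => exact List.prefix_refl _
  | cons s rest ih => exact (discStep_prefix v s).trans (ih _)

theorem disc_prefix (data : List (List Int)) (v : List Int) : v <+: disc v data := by
  induction data generalizing v with
  | nil => exact List.prefix_refl _
  | cons line rest ih => exact (foldl_discStep_prefix line v).trans (ih _)

theorem index?_prefix_mem (v V : List Int) (s : Int) (h : v <+: V) (hs : s ∈ v) :
    PySem.List.index? V s = PySem.List.index? v s := by
  obtain ⟨w, rfl⟩ := h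
  exact PySem.List.index?_append_of_mem w hs

theorem setGetD_append_lt (g t : List (List Int)) (i : Nat) (d : List Int)
    (h : i < g.length) : (g ++ t).getD i d = g.getD i d := by
  simp [List.getD, List.getElem?_append_left h]

theorem set_append_lt (g t : List (List Int)) (i : Nat) (x : List Int)
    (h : i < g.length) : (g ++ t).set i x = g.set i x ++ t := by
  rw [List.set_append]; simp [h]

theorem getD_append_self (g t : List (List Int)) (y d : List Int) :
    (g ++ y :: t).getD g.length d = y := by
  simp [List.getD]

theorem set_append_self (g t : List (List Int)) (y x : List Int) :
    (g ++ y :: t).set g.length x = g ++ x :: t := by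
  rw [List.set_append]; simp

theorem idx_lt (v : List Int) (s : Int) (hs : s ∈ v) :
    (PySem.List.index? v s).getD 0 < v.length := by
  cases h : PySem.List.index? v s with
  | none => exact absurd ((PySem.List.index?_eq_none_iff v s).mp h) (by simpa using hs)
  | some k =>
      obtain ⟨hk, -, -⟩ := PySem.List.getElem_of_index?_eq_some h
      simpa using hk

-- main A-side lemma: A's interleaved scan equals the edge pass on a padded graph
theorem aStep_run (subs L : List Int) (g : List (List Int)) (v V : List Int)
    (hlen : g.length = v.length) (hpre : (subs.foldl discStep v) <+: V) :
    (subs.foldl (aStep L) (g, v)).2 = subs.foldl discStep v ∧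
    (subs.foldl (aStep L) (g, v)).1.length = (subs.foldl discStep v).length ∧
    subs.foldl (eStep V L) (g ++ List.replicate (V.length - v.length) []) =
      (subs.foldl (aStep L) (g, v)).1 ++
        List.replicate (V.length - (subs.foldl discStep v).length) [] := by
  induction subs generalizing g v with
  | nil => exact ⟨rfl, hlen.symm ▸ rfl, rfl⟩
  | cons s subs ih =>
      simp only [List.foldl_cons]
      by_cases hm : s ∈ v
      · -- already visited
        have hds : discStep v s = v := by simp [discStep, hm]
        have hpre' : subs.foldl discStep v <+: V := by
          rw [List.foldl_cons, hds] at hpre; exact hpre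
        have hvV : v <+: V := (foldl_discStep_prefix subs v).trans hpre'
        have hiV : PySem.List.index? V s = PySem.List.index? v s :=
          index?_prefix_mem v V s hvV hm
        have hlt : (PySem.List.index? v s).getD 0 < g.length := by
          rw [hlen]; exact idx_lt v s hm
        have hstep : aStep L (g, v) s =
            ((g.set ((PySem.List.index? v s).getD 0)
              (aAddNbrs s L (g.getD ((PySem.List.index? v s).getD 0) []))), v) := by
          simp [aStep, hm]
        have hestep : eStep V L (g ++ List.replicate (V.length - v.length) []) s =
            (g.set ((PySem.List.index? v s).getD 0)
              (aAddNbrs s L (g.getD ((PySem.List.index? v s).getD 0) []))) ++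
              List.replicate (V.length - v.length) [] := by
          simp only [eStep, hiV]
          rw [setGetD_append_lt _ _ _ _ hlt, set_append_lt _ _ _ _ hlt]
        rw [hstep, hestep, hds]
        exact ih _ v (by simpa using hlen) hpre'
      · -- newly discovered
        have hds : discStep v s = v ++ [s] := by simp [discStep, hm]
        have hpre2 : subs.foldl discStep (v ++ [s]) <+: V := by
          rw [List.foldl_cons, hds] at hpre; exact hpre
        have hvsV : v ++ [s] <+: V := (foldl_discStep_prefix subs (v ++ [s])).trans hpre2
        obtain ⟨w, hw⟩ := hvsV
        have hidx : PySem.List.index? (v ++ [s]) s = some v.length :=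
          PySem.List.index?_append_singleton_self v s hm
        have hiV : PySem.List.index? V s = some v.length := by
          rw [← hw]
          rw [PySem.List.index?_append_of_mem w (show s ∈ v ++ [s] by simp)]
          exact hidx
        have hlenle : v.length + 1 ≤ V.length := by
          rw [← hw]; simp
        have hrep : List.replicate (V.length - v.length) ([] : List Int) =
            [] :: List.replicate (V.length - (v.length + 1)) [] := by
          have h1 : V.length - v.length = (V.length - (v.length + 1)) + 1 := by omega
          rw [h1, List.replicate_succ]
        have hstep : aStep L (g, v) s = (g ++ [aAddNbrs s L []], v ++ [s]) := by
          simp only [aStep, hm, not_false_eq_true, if_pos, hidx]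
          simp only [Option.getD_some]
          rw [← hlen]
          have h1 : (g ++ [[]]).getD g.length ([] : List Int) = [] :=
            getD_append_self g [] [] []
          have h2 : (g ++ [[]]).set g.length (aAddNbrs s L []) = g ++ [aAddNbrs s L []] :=
            set_append_self g [] [] _
          rw [h1, h2]
        have hestep : eStep V L (g ++ List.replicate (V.length - v.length) []) s =
            (g ++ [aAddNbrs s L []]) ++ List.replicate (V.length - (v.length + 1)) [] := by
          simp only [eStep, hiV, Option.getD_some]
          rw [hrep, ← hlen]
          rw [getD_append_self g _ [] [], set_append_self g _ [] _]
          simp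
        rw [hstep, hestep, hds]
        have := ih (g ++ [aAddNbrs s L []]) (v ++ [s])
          (by simp [hlen]) hpre2
        simp only [List.length_append, List.length_cons, List.length_nil] at this ⊢
        simpa using this

theorem aLine_run (data : List (List Int)) (g : List (List Int)) (v V : List Int)
    (hlen : g.length = v.length) (hpre : (disc v data) <+: V) :
    (data.foldl aLine (g, v)).2 = disc v data ∧
    (data.foldl aLine (g, v)).1.length = (disc v data).length ∧
    data.foldl (eLine V) (g ++ List.replicate (V.length - v.length) []) =
      (data.foldl aLine (g, v)).1 ++
        List.replicate (V.length - (disc v data).length) [] := by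
  induction data generalizing g v with
  | nil => exact ⟨rfl, hlen.symm ▸ rfl, rfl⟩
  | cons line rest ih =>
      simp only [List.foldl_cons]
      have hdisc : disc v (line :: rest) = disc (discLine v line) rest := rfl
      have hpre1 : discLine v line <+: V := by
        rw [hdisc] at hpre
        exact (disc_prefix rest (discLine v line)).trans hpre
      obtain ⟨h2, hl2, h3⟩ := aStep_run line line g v V hlen (hpre1 : _)
      have haline : aLine (g, v) line = line.foldl (aStep line) (g, v) := rfl
      have hv1 : (line.foldl (aStep line) (g, v)).2 = discLine v line := h2
      have heline : eLine V (g ++ List.replicate (V.length - v.length) []) line =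
          (line.foldl (aStep line) (g, v)).1 ++
            List.replicate (V.length - (discLine v line).length) [] := h3
      rw [haline, heline]
      have := ih ((line.foldl (aStep line) (g, v)).1) (discLine v line)
        (by rw [hl2]; rfl) (by rw [hdisc] at hpre; exact hpre)
      obtain ⟨i2, il2, i3⟩ := this
      refine ⟨?_, ?_, ?_⟩
      · have : (rest.foldl aLine (line.foldl (aStep line) (g, v))).2 =
            (rest.foldl aLine ((line.foldl (aStep line) (g, v)).1, discLine v line)).2 := by
          rw [← hv1]
        rw [this, i2, hdisc]
      · have : rest.foldl aLine (line.foldl (aStep line) (g, v)) =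
            rest.foldl aLine ((line.foldl (aStep line) (g, v)).1, discLine v line) := by
          rw [← hv1]
        rw [this, il2, hdisc]
      · have : rest.foldl aLine (line.foldl (aStep line) (g, v)) =
            rest.foldl aLine ((line.foldl (aStep line) (g, v)).1, discLine v line) := by
          rw [← hv1]
        rw [this, i3, hdisc]

-- properties of the discovered vertex list
theorem mem_discStep_self (v : List Int) (s : Int) : s ∈ discStep v s := by
  unfold discStep
  by_cases h : s ∈ v <;> simp [h]

theorem mem_foldl_discStep_of_mem (subs : List Int) (v : List Int) (s : Int)
    (h : s ∈ v) : s ∈ subs.foldl discStep v := by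
  obtain ⟨w, hw⟩ := foldl_discStep_prefix subs v
  rw [← hw]; exact List.mem_append_left _ h

theorem mem_discLine (line v : List Int) (s : Int) (h : s ∈ line) :
    s ∈ discLine v line := by
  induction line generalizing v with
  | nil => cases h
  | cons t rest ih =>
      rcases List.mem_cons.mp h with rfl | hs
      · exact mem_foldl_discStep_of_mem rest _ s (mem_discStep_self v s)
      · exact ih _ hs

theorem mem_disc (data : List (List Int)) (line : List Int) (s : Int)
    (hl : line ∈ data) (hs : s ∈ line) : ∀ v, s ∈ disc v data := by
  induction data with
  | nil => cases hl
  | cons l rest ih =>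
      intro v
      rcases List.mem_cons.mp hl with rfl | hl'
      · obtain ⟨w, hw⟩ := disc_prefix rest (discLine v line)
        show s ∈ disc (discLine v line) rest
        rw [← hw]; exact List.mem_append_left _ (mem_discLine line v s hs)
      · exact ih hl' _

theorem nodup_discStep (v : List Int) (s : Int) (h : v.Nodup) :
    (discStep v s).Nodup := by
  unfold discStep
  by_cases hm : s ∈ v
  · rw [if_pos hm]; exact h
  · rw [if_neg hm]
    refine List.Nodup.append h (List.nodup_singleton s) ?_
    intro a ha hb
    rw [List.mem_singleton] at hb
    exact hm (hb ▸ ha)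

theorem nodup_discLine (line v : List Int) (h : v.Nodup) : (discLine v line).Nodup := by
  induction line generalizing v with
  | nil => exact h
  | cons t rest ih => exact ih _ (nodup_discStep v t h)

theorem nodup_disc (data : List (List Int)) (v : List Int) (h : v.Nodup) :
    (disc v data).Nodup := by
  induction data generalizing v with
  | nil => exact h
  | cons line rest ih => exact ih _ (nodup_discLine line v h)

-- aAddNbrs basics
theorem aAddNbrs_subset (s : Int) (line c : List Int) (t : Int) (h : t ∈ c) :
    t ∈ aAddNbrs s line c := by
  unfold aAddNbrs
  induction line generalizing c with
  | nil => exact h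
  | cons u rest ih =>
      simp only [List.foldl_cons]
      split
      · exact ih _ (List.mem_append_left _ h)
      · exact ih _ h

theorem aAddNbrs_mem (s : Int) (line c : List Int) (t : Int)
    (ht : t ∈ line) (hts : t ≠ s) : t ∈ aAddNbrs s line c := by
  induction line generalizing c with
  | nil => cases ht
  | cons u rest ih =>
      rcases List.mem_cons.mp ht with rfl | h'
      · show t ∈ List.foldl _ (if t ≠ s ∧ t ∉ c then c ++ [t] else c) rest
        by_cases hc : t ∈ c
        · rw [if_neg (by simp [hc])]
          exact aAddNbrs_subset s rest c t hc
        · rw [if_pos ⟨hts, hc⟩]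
          exact aAddNbrs_subset s rest _ t (by simp)
      · show t ∈ List.foldl _ _ rest
        exact ih _ h'

theorem aAddNbrs_noop (s : Int) (line c : List Int)
    (h : ∀ t ∈ line, t ≠ s → t ∈ c) : aAddNbrs s line c = c := by
  induction line generalizing c with
  | nil => rfl
  | cons u rest ih =>
      show List.foldl _ (if u ≠ s ∧ u ∉ c then c ++ [u] else c) rest = c
      by_cases hu : u ≠ s ∧ u ∉ c
      · exact absurd (h u (by simp) hu.1) hu.2
      · rw [if_neg hu]
        exact ih c (fun t ht hts => h t (by simp [ht]) hts)

theorem aAddNbrs_idem (s : Int) (line c : List Int) :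
    aAddNbrs s line (aAddNbrs s line c) = aAddNbrs s line c :=
  aAddNbrs_noop s line _ (fun t ht hts => aAddNbrs_mem s line c t ht hts)

-- first-occurrence index on a nodup list
theorem index?_nodup (V : List Int) (hV : V.Nodup) (i : Nat) (hi : i < V.length) :
    PySem.List.index? V V[i] = some i := by
  have hm : V[i] ∈ V := List.getElem_mem hi
  cases h : PySem.List.index? V V[i] with
  | none => exact absurd ((PySem.List.index?_eq_none_iff V _).mp h) (by simpa using hm)
  | some k =>
      obtain ⟨hk, hVk, -⟩ := PySem.List.getElem_of_index?_eq_some h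
      have hki : k = i := (List.Nodup.getElem_inj_iff hV (hi := hk) (hj := hi)).mp
        (by rw [hVk])
      rw [hki]

-- per-cell action of the edge pass within one line
theorem eFold_length (V L subs : List Int) (g : List (List Int)) :
    (subs.foldl (eStep V L) g).length = g.length := by
  induction subs generalizing g with
  | nil => rfl
  | cons s rest ih =>
      show (rest.foldl (eStep V L) _).length = _
      rw [ih]; simp [eStep]

theorem eFold_cell (V L : List Int) (hV : V.Nodup) (subs : List Int)
    (hsubs : ∀ s ∈ subs, s ∈ V) (g : List (List Int)) (i : Nat)
    (hi : i < V.length) (hg : g.length = V.length) :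
    (subs.foldl (eStep V L) g).getD i [] =
      if V[i] ∈ subs then aAddNbrs V[i] L (g.getD i []) else g.getD i [] := by
  induction subs generalizing g with
  | nil => simp
  | cons s rest ih =>
      have hsV : s ∈ V := hsubs s (by simp)
      obtain ⟨j, hj, hVj⟩ : ∃ j, ∃ (h : j < V.length), V[j] = s := by
        obtain ⟨j, hj1, hj2⟩ := List.getElem_of_mem hsV
        exact ⟨j, hj1, hj2⟩
      have hidx : PySem.List.index? V s = some j := by
        rw [← hVj]; exact index?_nodup V hV j hj
      have hstep : eStep V L g s = g.set j (aAddNbrs s L (g.getD j [])) := by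
        simp only [eStep, hidx, Option.getD_some]
      show (rest.foldl (eStep V L) (eStep V L g s)).getD i [] = _
      rw [hstep]
      by_cases hij : j = i
      · subst hij
        have hVi : V[j] = s := hVj
        have hset : (g.set j (aAddNbrs s L (g.getD j []))).getD j [] =
            aAddNbrs s L (g.getD j []) := by
          simp [List.getD, List.getElem?_set_self (by omega : j < g.length)]
        rw [ih (fun t ht => hsubs t (by simp [ht])) _ (by simp [hg]), hset, hVi]
        by_cases hmem : s ∈ rest
        · rw [if_pos hmem, if_pos (by simp), aAddNbrs_idem]
        · rw [if_neg hmem, if_pos (by simp)]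
      · have hset : (g.set j (aAddNbrs s L (g.getD j []))).getD i [] = g.getD i [] := by
          simp [List.getD, List.getElem?_set_ne hij]
        rw [ih (fun t ht => hsubs t (by simp [ht])) _ (by simp [hg]), hset]
        have hne : V[i] ≠ s := by
          rw [← hVj]
          intro hEq
          exact hij ((List.Nodup.getElem_inj_iff hV (hi := hj) (hj := hi)).mp hEq.symm)
        by_cases hmem : V[i] ∈ rest
        · rw [if_pos hmem, if_pos (by simp [hmem])]
        · rw [if_neg hmem, if_neg (by simp [hmem, hne])]

-- per-cell action of the edge pass over the whole data
theorem eLines_cell (V : List Int) (hV : V.Nodup) (data : List (List Int))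
    (hd : ∀ line ∈ data, ∀ s ∈ line, s ∈ V) (g : List (List Int)) (i : Nat)
    (hi : i < V.length) (hg : g.length = V.length) :
    (data.foldl (eLine V) g).getD i [] =
      data.foldl (bNbrLine V[i]) (g.getD i []) := by
  induction data generalizing g with
  | nil => rfl
  | cons line rest ih =>
      show (rest.foldl (eLine V) (eLine V g line)).getD i [] = _
      have hcell : (eLine V g line).getD i [] = bNbrLine V[i] (g.getD i []) line := by
        unfold eLine bNbrLine
        rw [eFold_cell V line hV line (hd line (by simp)) g i hi hg]
        rfl
      have hlen : (eLine V g line).length = V.length := by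
        show (line.foldl (eStep V line) g).length = V.length
        rw [eFold_length]; exact hg
      rw [ih (fun l hl => hd l (by simp [hl])) _ hlen, hcell]
      rfl

theorem eLines_length (V : List Int) (data : List (List Int)) (g : List (List Int)) :
    (data.foldl (eLine V) g).length = g.length := by
  induction data generalizing g with
  | nil => rfl
  | cons line rest ih =>
      show (rest.foldl (eLine V) (eLine V g line)).length = _
      rw [ih]
      exact eFold_length V line line g

-- ===== VERDICT (by name: the statement is the Claim_ definition above) =====
theorem construct_graph_spec : Claim_equal_construct_graph := by
  unfold Claim_equal_construct_graph
  intro data _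
  show construct_graph data = construct_graph_alt data
  obtain ⟨h2, hl, h3⟩ := aLine_run data [] [] (disc [] data) rfl (List.prefix_refl _)
  set V := disc [] data with hdef
  have hVnd : V.Nodup := nodup_disc data [] (by simp)
  have hVall : ∀ line ∈ data, ∀ s ∈ line, s ∈ V :=
    fun line hl s hs => mem_disc data line s hl hs []
  have hA1 : data.foldl (eLine V) (List.replicate V.length []) =
      (data.foldl aLine ([], [])).1 := by
    have := h3
    simp only [List.nil_append, List.length_nil, Nat.sub_zero, Nat.sub_self,
      List.replicate_zero, List.append_nil] at this
    exact this
  have hBdef : construct_graph_alt data =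
      (V.map (fun v => bNbrs v data), V) := by
    show ((data.foldl bVisitLine []).map _, data.foldl bVisitLine []) = _
    rw [bVisitLine_eq]
    rfl
  rw [hBdef]
  have hAdef : construct_graph data =
      ((data.foldl aLine ([], [])).1, (data.foldl aLine ([], [])).2) := rfl
  rw [hAdef, h2]
  refine Prod.ext ?_ rfl
  rw [← hA1]
  apply List.ext_getElem
  · rw [eLines_length]; simp
  · intro i hi1 hi2
    have hiV : i < V.length := by
      rw [eLines_length] at hi1; simpa using hi1
    have := eLines_cell V hVnd data hVall (List.replicate V.length []) i hiV (by simp)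
    rw [List.getD_eq_getElem _ _ hi1] at this
    rw [this]
    have : (List.replicate V.length ([] : List Int)).getD i [] = [] := by
      simp [List.getD]
    rw [this]
    simp [bNbrs]
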